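-- pv_equiv track=rewrite | github.com/shamBITS2024/OCR | annexure_table_utils.py | parse_annexure_number
-- ===== SOURCE A (Python) =====
-- def parse_annexure_number(token: str) -> int | None:
--     token = (token or "").strip().lower()
--     if not token:
--         return None
--
--     if token.isdigit():
--         try:
--             return int(token)
--         except ValueError:
--             return None
--
--     token = token.replace("1", "i").replace("l", "i")
--     if set(token) <= {"i"}:
--         return len(token)
--
--     roman_map = {"i": 1, "v": 5, "x": 10, "l": 50, "c": 100, "d": 500, "m": 1000}
--     try:
--         values = [roman_map[ch] for ch in token]
--     except KeyError:
--         return None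
--
--     total = 0
--     prev = 0
--     for value in reversed(values):
--         if value < prev:
--             total -= value
--         else:
--             total += value
--             prev = value
--     return total or None
-- ===== SOURCE B (Python) =====
-- def parse_annexure_number(token: str) -> int | None:
--     token = (token or "").strip().lower()
--     if not token:
--         return None
--
--     if token.isdigit():
--         try:
--             return int(token)
--         except ValueError:
--             return None
--
--     token = token.replace("1", "i").replace("l", "i")
--     if all(ch == "i" for ch in token):
--         return len(token)
--
--     roman = {"i": 1, "v": 5, "x": 10, "l": 50, "c": 100, "d": 500, "m": 1000}
--     if not all(ch in roman for ch in token):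
--         return None
--     values = [roman[ch] for ch in token]
--
--     # suffix-max table: suf[j] = max of values strictly to the right of j (0 if none)
--     suf = []
--     m = 0
--     for v in reversed(values):
--         suf.append(m)
--         m = v if v > m else m
--     suf.reverse()
--
--     total = 0
--     for v, s in zip(values, suf):
--         total += v if v >= s else -v
--     return total or None
-- ===== Notes on version B (the rewrite author's own statement) =====
-- stated objective: alternative
-- what changed: The Roman summation is recomputed via an explicit suffix-maximum table built in one right-to-left pass and consumed by a forward zip pass, replacing A's reversed-order accumulator with a tracked prev; the KeyError guard becomes an up-front membership check over the token.
import Mathlib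
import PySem

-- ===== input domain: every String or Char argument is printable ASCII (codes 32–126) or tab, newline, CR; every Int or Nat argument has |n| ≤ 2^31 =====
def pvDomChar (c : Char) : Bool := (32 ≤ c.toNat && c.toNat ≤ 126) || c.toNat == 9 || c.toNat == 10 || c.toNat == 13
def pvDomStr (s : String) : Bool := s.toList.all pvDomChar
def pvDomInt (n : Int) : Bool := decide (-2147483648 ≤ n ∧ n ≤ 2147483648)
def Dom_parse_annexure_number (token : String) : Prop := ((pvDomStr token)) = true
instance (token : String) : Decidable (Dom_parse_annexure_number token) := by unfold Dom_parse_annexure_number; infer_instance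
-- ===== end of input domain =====

-- B replaces A's reversed prev-tracking accumulator by a suffix-maximum table plus a forward
-- pass (objective: alternative decomposition, same cost). Return values agree everywhere.

-- ===== PORT A =====
-- roman_map literal of A
def romanMapA : PySem.Dict Char Int :=
  PySem.Dict.ofList [('i',1),('v',5),('x',10),('l',50),('c',100),('d',500),('m',1000)]

-- [roman_map[ch] for ch in token] with KeyError -> none
def mapRomanA : List Char → Option (List Int)
  | [] => some []
  | c :: cs =>
    match romanMapA.get? c, mapRomanA cs with
    | some v, some vs => some (v :: vs)
    | _, _ => none

-- total/prev loop over reversed(values), then 'return total or None'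
def romanLoopA (values : List Int) : Option Int :=
  let tp := values.reverse.foldl
    (fun (tp : Int × Int) v => if v < tp.2 then (tp.1 - v, tp.2) else (tp.1 + v, v)) (0, 0)
  if tp.1 = 0 then none else some tp.1

-- the code from 'if set(token) <= {"i"}' on (t2 = token after the replaces)
def romanBranchA (t2 : String) : Option Int :=
  if PySem.Set.issubset (PySem.Set.ofList t2.toList) (PySem.Set.ofList ['i']) then
    some (PySem.Str.len t2)
  else
    match mapRomanA t2.toList with
    | none => none
    | some values => romanLoopA values

-- the code after 'token = (token or "").strip().lower()' (t is that token)
def stageA (t : String) : Option Int :=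
  if t = "" then none
  else if PySem.Str.strIsdigit t then
    match PySem.Int.ofStr? t with
    | some n => some n
    | none => none
  else romanBranchA (PySem.Str.replace (PySem.Str.replace t "1" "i") "l" "i")

def parse_annexure_number (token : String) : Option Int :=
  -- (token or "") is token for a str argument
  stageA (PySem.Str.lower (PySem.Str.strip token))

-- ===== PORT B =====
def romanMapB : PySem.Dict Char Int :=
  PySem.Dict.ofList [('i',1),('v',5),('x',10),('l',50),('c',100),('d',500),('m',1000)]

-- suffix-max table built right-to-left, then the forward zip pass; 'return total or None'
def sumB (values : List Int) : Option Int :=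
  let p := values.reverse.foldl
    (fun (p : List Int × Int) v => (p.1 ++ [p.2], if v > p.2 then v else p.2)) ([], 0)
  let suf := p.1.reverse
  let total := (values.zip suf).foldl (fun t q => t + (if q.1 ≥ q.2 then q.1 else -q.1)) 0
  if total = 0 then none else some total

-- the code from 'if all(ch == "i" ...)' on (t2 = token after the replaces)
def romanBranchB (t2 : String) : Option Int :=
  if t2.toList.all (fun c => c == 'i') then some (PySem.Str.len t2)
  else if t2.toList.all (fun c => (romanMapB.get? c).isSome) then
    -- roman[ch]: getD 0 is exact, every ch was just checked to be a key
    sumB (t2.toList.map (fun c => (romanMapB.get? c).getD 0))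
  else none

-- the code after 'token = (token or "").strip().lower()'
def stageB (t : String) : Option Int :=
  if t = "" then none
  else if PySem.Str.strIsdigit t then
    match PySem.Int.ofStr? t with
    | some n => some n
    | none => none
  else romanBranchB (PySem.Str.replace (PySem.Str.replace t "1" "i") "l" "i")

def parse_annexure_number_alt (token : String) : Option Int :=
  stageB (PySem.Str.lower (PySem.Str.strip token))

-- ===== PRECONDITION & SPEC =====
def Spec_parse_annexure_number (token : String) (out : Option Int) : Prop := out = parse_annexure_number_alt token
instance (token : String) (out : Option Int) : Decidable (Spec_parse_annexure_number token out) := by unfold Spec_parse_annexure_number; infer_instance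

-- ===== CLAIM (what is proved, stated in full; the proofs are below) =====
def Claim_equal_parse_annexure_number : Prop := ∀ (token : String), Dom_parse_annexure_number token → Spec_parse_annexure_number token (parse_annexure_number token)

-- ===== LEMMAS AND PROOFS =====

-- the sign-resolved terms of A's loop: running max m, add if v ≥ m else subtract
def pvSigned : List Int → Int → List Int
  | [], _ => []
  | v :: vs, m => (if v < m then -v else v) :: pvSigned vs (if v < m then m else v)

-- the suffix-max entries produced left-to-right over the reversed list
def pvSufs : List Int → Int → List Int
  | [], _ => []
  | v :: vs, m => m :: pvSufs vs (if v < m then m else v)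

theorem pvFoldA_eq (r : List Int) : ∀ (t m : Int),
    (r.foldl (fun (tp : Int × Int) v => if v < tp.2 then (tp.1 - v, tp.2) else (tp.1 + v, v)) (t, m)).1
      = t + (pvSigned r m).sum := by
  induction r with
  | nil => intro t m; simp [pvSigned]
  | cons v vs ih =>
    intro t m
    simp only [List.foldl_cons, pvSigned, List.sum_cons]
    by_cases h : v < m <;> simp [h, ih] <;> ring

theorem pvFoldS_eq (r : List Int) : ∀ (acc : List Int) (m : Int),
    (r.foldl (fun (p : List Int × Int) v => (p.1 ++ [p.2], if v > p.2 then v else p.2)) (acc, m)).1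
      = acc ++ pvSufs r m := by
  induction r with
  | nil => intro acc m; simp [pvSufs]
  | cons v vs ih =>
    intro acc m
    have hmax : (if v > m then v else m) = (if v < m then m else v) := by
      split_ifs <;> omega
    simp only [List.foldl_cons, pvSufs, hmax, ih, List.append_assoc, List.singleton_append]

theorem pvSigned_eq_zip (r : List Int) : ∀ (m : Int),
    pvSigned r m = (r.zip (pvSufs r m)).map (fun q => if q.1 < q.2 then -q.1 else q.1) := by
  induction r with
  | nil => intro m; simp [pvSigned, pvSufs]
  | cons v vs ih => intro m; simp [pvSigned, pvSufs, ih]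

theorem pvSufs_length (r : List Int) : ∀ (m : Int), (pvSufs r m).length = r.length := by
  induction r with
  | nil => intro m; rfl
  | cons v vs ih => intro m; simp [pvSufs, ih]

theorem pvZip_reverse {α β : Type} (l : List α) (l' : List β) (h : l.length = l'.length) :
    l.reverse.zip l'.reverse = (l.zip l').reverse := by
  induction l generalizing l' with
  | nil => cases l' with
    | nil => rfl
    | cons b bs => simp at h
  | cons a as ih =>
    cases l' with
    | nil => simp at h
    | cons b bs =>
      simp only [List.length_cons, Nat.succ.injEq] at h
      simp only [List.reverse_cons]
      rw [List.zip_append (by simp [h]), ih bs h]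
      simp

theorem pvFoldAdd (l : List (Int × Int)) (f : Int × Int → Int) : ∀ (t : Int),
    l.foldl (fun t q => t + f q) t = t + (l.map f).sum := by
  induction l with
  | nil => intro t; simp
  | cons q qs ih => intro t; simp [ih]; ring

theorem pvCore (values : List Int) :
    (values.reverse.foldl
        (fun (tp : Int × Int) v => if v < tp.2 then (tp.1 - v, tp.2) else (tp.1 + v, v)) (0, 0)).1
      = (values.zip ((values.reverse.foldl
            (fun (p : List Int × Int) v => (p.1 ++ [p.2], if v > p.2 then v else p.2)) ([], 0)).1.reverse)).foldl
          (fun t q => t + (if q.1 ≥ q.2 then q.1 else -q.1)) 0 := by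
  rw [pvFoldA_eq, pvFoldS_eq, pvFoldAdd]
  have hz := pvZip_reverse values.reverse (pvSufs values.reverse 0) (by simp [pvSufs_length])
  rw [List.reverse_reverse] at hz
  have hf : ∀ q : Int × Int, (if q.1 ≥ q.2 then q.1 else -q.1) = (if q.1 < q.2 then -q.1 else q.1) := by
    intro q; split_ifs <;> omega
  simp only [List.nil_append, hz, List.map_reverse, List.sum_reverse, pvSigned_eq_zip]
  rw [List.map_congr_left (fun q _ => hf q)]

theorem pvSubset_eq_all (l : List Char) :
    PySem.Set.issubset (PySem.Set.ofList l) (PySem.Set.ofList ['i']) = l.all (fun c => c == 'i') := by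
  by_cases h : l.all (fun c => c == 'i') = true
  · rw [h]
    rw [PySem.Set.issubset_iff]
    intro x hx
    have := (PySem.Set.mem_ofList l x).1 hx
    simp only [List.all_eq_true] at h
    have := h x this
    simp_all [PySem.Set.mem_ofList]
  · rw [Bool.eq_false_iff.2 h]
    rw [Bool.eq_false_iff]
    intro hc
    apply h
    rw [PySem.Set.issubset_iff] at hc
    simp only [List.all_eq_true]
    intro x hx
    have := hc x ((PySem.Set.mem_ofList l x).2 hx)
    simp_all [PySem.Set.mem_ofList]

theorem pvMapRoman_some (l : List Char) (h : l.all (fun c => ((romanMapA.get? c).isSome : Bool)) = true) :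
    mapRomanA l = some (l.map (fun c => (romanMapA.get? c).getD 0)) := by
  induction l with
  | nil => rfl
  | cons c cs ih =>
    simp only [List.all_cons, Bool.and_eq_true] at h
    obtain ⟨h1, h2⟩ := h
    obtain ⟨v, hv⟩ := Option.isSome_iff_exists.1 h1
    simp [mapRomanA, hv, ih h2]

theorem pvMapRoman_none (l : List Char) (h : l.all (fun c => ((romanMapA.get? c).isSome : Bool)) = false) :
    mapRomanA l = none := by
  induction l with
  | nil => simp at h
  | cons c cs ih =>
    simp only [List.all_cons, Bool.and_eq_false_iff] at h
    cases h with
    | inl h1 =>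
      have : romanMapA.get? c = none := by
        cases hg : romanMapA.get? c <;> simp_all
      simp [mapRomanA, this]
    | inr h2 => cases hg : romanMapA.get? c <;> simp [mapRomanA, hg, ih h2]

-- ===== VERDICT (by name: the statement is the Claim_ definition above) =====
theorem pvLoop_eq_sumB (values : List Int) : romanLoopA values = sumB values := by
  simp only [romanLoopA, sumB]
  rw [pvCore]

theorem pvRomanBranch_eq (t2 : String) : romanBranchA t2 = romanBranchB t2 := by
  unfold romanBranchA romanBranchB
  have hrm : romanMapB = romanMapA := rfl
  rw [hrm, pvSubset_eq_all]
  by_cases h2 : t2.toList.all (fun c => c == 'i') = true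
  · rw [if_pos h2, if_pos h2]
  · rw [if_neg h2, if_neg h2]
    by_cases h3 : t2.toList.all (fun c => ((romanMapA.get? c).isSome : Bool)) = true
    · rw [pvMapRoman_some _ h3, if_pos h3]
      exact pvLoop_eq_sumB _
    · rw [pvMapRoman_none _ (Bool.eq_false_iff.2 h3), if_neg h3]

theorem pvStage_eq (t : String) : stageA t = stageB t := by
  unfold stageA stageB
  by_cases h0 : t = ""
  · rw [if_pos h0, if_pos h0]
  · rw [if_neg h0, if_neg h0]
    by_cases h1 : PySem.Str.strIsdigit t = true
    · rw [if_pos h1, if_pos h1]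
    · rw [if_neg h1, if_neg h1, pvRomanBranch_eq]

-- ===== VERDICT (by name: the statement is the Claim_ definition above) =====
theorem parse_annexure_number_spec : Claim_equal_parse_annexure_number := by
  intro token _
  show parse_annexure_number token = parse_annexure_number_alt token
  unfold parse_annexure_number parse_annexure_number_alt
  exact pvStage_eq _
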